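-- pv_equiv track=rewrite | github.com/simoRancati/DeepAutoCoV | Simulation/DeepAutoCov_France/utils.py | true_lineages_week
-- ===== SOURCE A (Python) =====
-- def true_lineages_week(test_set, true_positives):
--     """
--     Counts the number of true positive lineages present in a test set,
--     making it robust against whitespace variations.
--
--     Args:
--     test_set (list): List of lineages present in the test set.
--     true_positives (list): List of lineages considered as true positives.
--
--     Returns:
--     int: Number of true positives in the test set.
--     """
--     count = 0
--     # Trimming whitespace in both lists
--     trimmed_test_set = [lineage.strip() for lineage in test_set]
--     trimmed_true_positives = [lineage.strip() for lineage in true_positives]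
--
--     for lineage in trimmed_test_set:
--         if lineage in trimmed_true_positives:
--             count += 1
--
--     return count
-- ===== SOURCE B (Python) =====
-- def true_lineages_week(test_set, true_positives):
--     # Build a frequency index of the trimmed test set once, then sum the
--     # multiplicities of the distinct trimmed true-positive labels.
--     counts = {}
--     for lineage in test_set:
--         key = lineage.strip()
--         counts[key] = counts.get(key, 0) + 1
--     total = 0
--     for label in set(tp.strip() for tp in true_positives):
--         total += counts.get(label, 0)
--     return total
-- ===== Notes on version B (the rewrite author's own statement) =====
-- stated objective: faster
-- what changed: Instead of scanning the true-positive list once per test element, B builds a frequency dictionary of the trimmed test set and sums the multiplicities over the distinct trimmed true-positive labels.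
import Mathlib
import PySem

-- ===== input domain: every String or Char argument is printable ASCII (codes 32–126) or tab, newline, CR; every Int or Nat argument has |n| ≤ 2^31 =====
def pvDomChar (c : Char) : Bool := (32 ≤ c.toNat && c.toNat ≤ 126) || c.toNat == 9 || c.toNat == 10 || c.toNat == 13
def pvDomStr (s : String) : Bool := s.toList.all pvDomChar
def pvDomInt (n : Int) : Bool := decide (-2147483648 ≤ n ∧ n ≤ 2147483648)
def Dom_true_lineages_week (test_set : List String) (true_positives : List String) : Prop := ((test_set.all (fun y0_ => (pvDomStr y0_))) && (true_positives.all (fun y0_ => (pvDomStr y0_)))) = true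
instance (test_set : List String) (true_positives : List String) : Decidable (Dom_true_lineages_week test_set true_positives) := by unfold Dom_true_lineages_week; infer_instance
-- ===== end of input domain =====

-- B replaces A's membership scan per test element with a frequency dictionary of the
-- trimmed test set summed over the distinct trimmed true-positive labels (asymptotically fewer comparisons).

-- ===== PORT A =====
def true_lineages_week (test_set : List String) (true_positives : List String) : Int :=
  let trimmed_test_set := test_set.map PySem.Str.strip
  let trimmed_true_positives := true_positives.map PySem.Str.strip
  trimmed_test_set.foldl
    (fun count lineage => if lineage ∈ trimmed_true_positives then count + 1 else count) 0

-- ===== PORT B =====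
def true_lineages_week_alt (test_set : List String) (true_positives : List String) : Int :=
  let counts : PySem.Dict String Int :=
    test_set.foldl (fun d lineage =>
      let key := PySem.Str.strip lineage
      d.insert key (d.getD key 0 + 1)) PySem.Dict.empty
  let labels : PySem.Set String := PySem.Set.ofList (true_positives.map PySem.Str.strip)
  labels.foldl (fun total label => total + counts.getD label 0) 0

-- ===== PRECONDITION & SPEC =====
def Spec_true_lineages_week (test_set : List String) (true_positives : List String) (out : Int) : Prop := out = true_lineages_week_alt test_set true_positives
instance (test_set : List String) (true_positives : List String) (out : Int) : Decidable (Spec_true_lineages_week test_set true_positives out) := by unfold Spec_true_lineages_week; infer_instance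

-- ===== CLAIM (what is proved, stated in full; the proofs are below) =====
def Claim_equal_true_lineages_week : Prop := ∀ (test_set : List String) (true_positives : List String), Dom_true_lineages_week test_set true_positives → Spec_true_lineages_week test_set true_positives (true_lineages_week test_set true_positives)

-- ===== LEMMAS AND PROOFS =====

-- the insert/getD counting fold is a frequency table
theorem getD_countFold (xs : List String) (l : String) :
    ∀ d : PySem.Dict String Int,
      ((xs.foldl (fun d x => d.insert x (d.getD x 0 + 1)) d).getD l 0)
        = d.getD l 0 + (xs.count l : Int) := by
  induction xs with
  | nil => intro d; simp
  | cons x xs ih =>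
    intro d
    simp only [List.foldl_cons, List.count_cons, ih, PySem.Dict.getD_insert]
    by_cases hx : l = x
    · subst hx
      simp
      ring
    · simp only [if_neg hx, beq_iff_eq]
      rw [if_neg (fun h => hx h.symm)]
      push_cast
      ring

theorem sum_indicator (x : String) (S : List String) (hS : S.Nodup) :
    (S.map (fun l => if x = l then (1 : Int) else 0)).sum
      = if x ∈ S then (1 : Int) else 0 := by
  induction S with
  | nil => simp
  | cons s S ih =>
    simp only [List.nodup_cons] at hS
    by_cases hx : x = s
    · subst hx
      simp only [List.map_cons, List.sum_cons, List.mem_cons, true_or, if_pos]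
      have : (S.map (fun l => if x = l then (1 : Int) else 0)).sum = 0 := by
        rw [ih hS.2]
        simp [fun h => hS.1 h]
      omega
    · simp only [List.map_cons, List.sum_cons, if_neg hx, ih hS.2, List.mem_cons]
      simp [hx]

theorem countP_eq_sum_counts (tt : List String) (S : List String) (hS : S.Nodup) :
    ((tt.countP (fun x => decide (x ∈ S)) : Nat) : Int)
      = (S.map (fun l => (tt.count l : Int))).sum := by
  induction tt with
  | nil => simp
  | cons x tt ih =>
    have hmap : S.map (fun l => ((x :: tt).count l : Int))
        = S.map (fun l => (tt.count l : Int) + (if x = l then (1:Int) else 0)) := by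
      apply List.map_congr_left
      intro l _
      rw [List.count_cons]
      push_cast [beq_iff_eq]
      split_ifs <;> ring
    rw [hmap]
    have hsum : (S.map (fun l => (tt.count l : Int) + (if x = l then (1:Int) else 0))).sum
        = (S.map (fun l => (tt.count l : Int))).sum
          + (S.map (fun l => if x = l then (1:Int) else 0)).sum := by
      simp [← List.sum_map_add]
    rw [hsum, ← ih, sum_indicator x S hS, List.countP_cons]
    by_cases h : x ∈ S <;> simp [h]

-- ===== VERDICT (by name: the statement is the Claim_ definition above) =====
theorem true_lineages_week_spec : Claim_equal_true_lineages_week := by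
  intro test_set true_positives _
  unfold Spec_true_lineages_week true_lineages_week true_lineages_week_alt
  simp only []
  set tt := test_set.map PySem.Str.strip with htt
  set tp := true_positives.map PySem.Str.strip with htp
  rw [PySem.List.foldl_ite_add_one]
  have hcnt : ∀ l, ((test_set.foldl (fun d lineage =>
        d.insert (PySem.Str.strip lineage) (d.getD (PySem.Str.strip lineage) 0 + 1))
        PySem.Dict.empty).getD l 0) = (tt.count l : Int) := by
    intro l
    have := getD_countFold tt l PySem.Dict.empty
    rw [List.foldl_map] at this
    simpa using this
  have hfold : (PySem.Set.ofList tp).foldl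
      (fun total label => total + (test_set.foldl (fun d lineage =>
        d.insert (PySem.Str.strip lineage) (d.getD (PySem.Str.strip lineage) 0 + 1))
        PySem.Dict.empty).getD label 0) 0
      = (PySem.Set.ofList tp).foldl (fun total label => total + (tt.count label : Int)) 0 := by
    apply PySem.List.foldl_congr_mem
    intro acc x _
    rw [hcnt]
  rw [hfold, PySem.List.foldl_add]
  have hmem : tt.countP (fun x => decide (x ∈ tp))
      = tt.countP (fun x => decide (x ∈ PySem.Set.ofList tp)) := by
    apply List.countP_congr
    intro x _
    simp [PySem.Set.mem_ofList]
  rw [hmem]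
  have := countP_eq_sum_counts tt (PySem.Set.ofList tp) (PySem.Set.nodup_ofList tp)
  omega
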